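-- pv_equiv track=rewrite | github.com/jeremyfleche/Advent-of-Code | 2023/13/13.py | est_symetrique
-- ===== SOURCE A (Python) =====
-- def colonne(grille, j):
-- 	return [grille[i][j] for i in range(len(grille))]
--
-- def est_symetrique(grille, mode_ligne):
-- 	if mode_ligne:
-- 		for i in range(len(grille)//2):
-- 			if grille[i] != grille[len(grille)-i-1]:
-- 				return False
-- 		return True
-- 	else:
-- 		for j in range(len(grille[0])//2):
-- 			if colonne(grille,j) != colonne(grille,len(grille[0])-j-1):
-- 				return False
-- 		return True
-- ===== SOURCE B (Python) =====
-- def est_symetrique(grille, mode_ligne):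
-- 	if mode_ligne:
-- 		return grille == grille[::-1]
-- 	cols = [list(c) for c in zip(*grille)]
-- 	return cols == cols[::-1]
-- ===== Notes on version B (the rewrite author's own statement) =====
-- stated objective: simpler
-- what changed: B replaces A's half-length index loop with a whole-sequence mirror comparison: row mode is grille == grille[::-1], column mode transposes once with zip(*grille) and compares the column list with its reverse, instead of rebuilding each column pair inside an index loop.
import Mathlib
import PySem

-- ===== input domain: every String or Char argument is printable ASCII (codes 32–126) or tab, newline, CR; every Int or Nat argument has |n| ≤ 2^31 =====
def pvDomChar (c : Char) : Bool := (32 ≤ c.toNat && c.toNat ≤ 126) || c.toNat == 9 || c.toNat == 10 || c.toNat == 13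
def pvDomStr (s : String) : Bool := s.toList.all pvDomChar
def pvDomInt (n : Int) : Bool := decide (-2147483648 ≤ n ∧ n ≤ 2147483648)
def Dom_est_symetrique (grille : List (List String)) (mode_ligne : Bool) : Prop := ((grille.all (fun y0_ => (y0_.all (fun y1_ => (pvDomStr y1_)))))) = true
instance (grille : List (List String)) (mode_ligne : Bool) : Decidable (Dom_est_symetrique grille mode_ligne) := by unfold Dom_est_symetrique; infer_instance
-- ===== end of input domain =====

-- B replaces A's half-length index loop with a whole-sequence mirror comparison (transposing once
-- in column mode); same asymptotic cost, simpler shape.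

-- ===== PORT A =====
-- colonne(grille, j): every index is in range on the inputs Pre_ admits, so getD is exact there.
def colonneA (grille : List (List String)) (j : Nat) : List String :=
  (List.range grille.length).map (fun i => (grille.getD i []).getD j "")

def est_symetrique (grille : List (List String)) (mode_ligne : Bool) : Bool :=
  if mode_ligne then
    -- 'for i in range(len(grille)//2): if … != …: return False' then 'return True' == all
    (List.range (grille.length / 2)).all
      (fun i => grille.getD i [] == grille.getD (grille.length - i - 1) [])
  else
    -- len(grille[0]); grille = [] raises IndexError in Python and is excluded by Pre_
    let w := (grille.headD []).length
    (List.range (w / 2)).all (fun j => colonneA grille j == colonneA grille (w - j - 1))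

-- ===== PORT B =====
-- zip(*grille): truncating transpose (columns up to the shortest row), exactly Python's zip.
def zipStar (g : List (List String)) : List (List String) :=
  (List.range (((g.map List.length).min?).getD 0)).map (fun j => g.map (fun r => r.getD j ""))

def est_symetrique_alt (grille : List (List String)) (mode_ligne : Bool) : Bool :=
  if mode_ligne then
    grille == grille.reverse
  else
    let cols := zipStar grille
    cols == cols.reverse

-- ===== PRECONDITION & SPEC =====
-- Pre_ excludes exactly the inputs on which A raises IndexError: column mode with an empty grid,
-- or with a first row of length ≥ 2 while some row is shorter than it; A returns everywhere else.
def Pre_est_symetrique (grille : List (List String)) (mode_ligne : Bool) : Prop :=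
  mode_ligne = true ∨
    (grille ≠ [] ∧
      (2 ≤ (grille.headD []).length → ∀ r ∈ grille, (grille.headD []).length ≤ r.length))
instance (grille : List (List String)) (mode_ligne : Bool) : Decidable (Pre_est_symetrique grille mode_ligne) := by unfold Pre_est_symetrique; infer_instance

def pvWitness_est_symetrique : List (List String) × Bool := ([["a", "b"], ["a", "b"]], false)

def Spec_est_symetrique (grille : List (List String)) (mode_ligne : Bool) (out : Bool) : Prop := out = est_symetrique_alt grille mode_ligne
instance (grille : List (List String)) (mode_ligne : Bool) (out : Bool) : Decidable (Spec_est_symetrique grille mode_ligne out) := by unfold Spec_est_symetrique; infer_instance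

-- ===== CLAIM (what is proved, stated in full; the proofs are below) =====
def Claim_equal_est_symetrique : Prop := ∀ (grille : List (List String)) (mode_ligne : Bool), Dom_est_symetrique grille mode_ligne → Pre_est_symetrique grille mode_ligne → Spec_est_symetrique grille mode_ligne (est_symetrique grille mode_ligne)

-- ===== LEMMAS AND PROOFS =====

-- From the half-range mirror checks, the full-range mirror identity follows.
theorem pal_key {α : Type} (d : α) (l : List α)
    (h : ∀ i < l.length / 2, l.getD i d = l.getD (l.length - i - 1) d) :
    ∀ i (hi : i < l.length), l[i] = l[l.length - 1 - i]'(by omega) := by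
  intro i hi
  by_cases hc : i < l.length / 2
  · have := h i hc
    rw [List.getD_eq_getElem l d hi, List.getD_eq_getElem l d (by omega)] at this
    rw [this]
    exact getElem_congr_idx (by omega)
  · by_cases he : i = l.length - 1 - i
    · exact getElem_congr_idx he
    · have h2 : l.length - 1 - i < l.length / 2 := by omega
      have := h (l.length - 1 - i) h2
      rw [List.getD_eq_getElem l d (by omega), List.getD_eq_getElem l d (by omega)] at this
      rw [this]
      exact (getElem_congr_idx (by omega)).symm

-- A's half-length index loop equals B's whole-sequence mirror comparison.
theorem pal_half {α : Type} [BEq α] [LawfulBEq α] (d : α) (l : List α) :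
    ((List.range (l.length / 2)).all
      (fun i => l.getD i d == l.getD (l.length - i - 1) d)) = (l == l.reverse) := by
  rw [Bool.eq_iff_iff]
  simp only [List.all_eq_true, List.mem_range, beq_iff_eq]
  constructor
  · intro h
    apply List.ext_getElem (by simp)
    intro i h1 h2
    rw [List.getElem_reverse]
    exact pal_key d l h i h1
  · intro h i hi
    rw [List.getD_eq_getElem l d (by omega), List.getD_eq_getElem l d (by omega)]
    calc l[i]'(by omega) = l.reverse[i]'(by simp; omega) := List.getElem_of_eq h _
      _ = l[l.length - 1 - i]'(by omega) := List.getElem_reverse _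
      _ = l[l.length - i - 1]'(by omega) := getElem_congr_idx (by omega)

theorem colonneA_eq_map (g : List (List String)) (j : Nat) :
    colonneA g j = g.map (fun r => r.getD j "") := by
  apply List.ext_getElem (by simp [colonneA])
  intro i h1 h2
  have hi : i < g.length := by simpa using h2
  simp [colonneA, List.getElem?_eq_getElem hi]

theorem reverse_of_short {α : Type} (l : List α) (h : l.length ≤ 1) : l.reverse = l := by
  cases l with
  | nil => rfl
  | cons x xs => cases xs with
    | nil => rfl
    | cons y ys => simp at h

theorem est_symetrique_main (grille : List (List String)) (mode_ligne : Bool)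
    (hpre : Pre_est_symetrique grille mode_ligne) :
    est_symetrique grille mode_ligne = est_symetrique_alt grille mode_ligne := by
  unfold Pre_est_symetrique at hpre
  cases mode_ligne with
  | true =>
      simpa [est_symetrique, est_symetrique_alt] using pal_half ([] : List String) grille
  | false =>
      obtain ⟨hne, hrows⟩ := hpre.resolve_left (by simp)
      obtain ⟨r0, rest, rfl⟩ := List.exists_cons_of_ne_nil hne
      set g := r0 :: rest with hg
      set w := (g.headD []).length with hw
      simp only [est_symetrique, est_symetrique_alt, Bool.false_eq_true, if_false, ← hw]
      by_cases hbig : 2 ≤ w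
      · have hmin : (g.map List.length).min? = some r0.length := by
          rw [List.min?_eq_some_iff]
          refine ⟨by simp [hg], ?_⟩
          intro b hb
          simp only [List.mem_map] at hb
          obtain ⟨r, hr, rfl⟩ := hb
          exact hrows hbig r hr
        have hw0 : w = r0.length := by simp [hw, hg]
        have hlen : (zipStar g).length = w := by
          simp [zipStar, hmin, hw0]
        have hcol : ∀ j, j < w → (zipStar g).getD j [] = colonneA g j := by
          intro j hj
          have hj' : j < (zipStar g).length := by omega
          rw [List.getD_eq_getElem _ _ hj', colonneA_eq_map]
          simp [zipStar, hmin]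
        have hph := pal_half ([] : List String) (zipStar g)
        rw [hlen] at hph
        rw [← hph]
        refine Bool.eq_iff_iff.mpr ?_
        simp only [List.all_eq_true, List.mem_range]
        constructor
        · intro h j hj
          rw [hcol j (by omega), hcol (w - j - 1) (by omega)]
          exact h j hj
        · intro h j hj
          rw [← hcol j (by omega), ← hcol (w - j - 1) (by omega)]
          exact h j hj
      · have hz : w / 2 = 0 := by omega
        rw [hz]
        simp only [List.range_zero, List.all_nil]
        have hshort : (zipStar g).length ≤ 1 := by
          cases hm : (g.map List.length).min? with
          | none =>
              rw [List.min?_eq_none_iff] at hm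
              simp [hg] at hm
          | some a =>
              have := (List.min?_eq_some_iff.mp hm).2 r0.length (by simp [hg])
              have hw0 : w = r0.length := by simp [hw, hg]
              simp only [zipStar, hm, Option.getD_some, List.length_map, List.length_range]
              omega
        rw [reverse_of_short _ hshort]
        simp

-- ===== VERDICT (by name: the statement is the Claim_ definition above) =====
theorem est_symetrique_spec : Claim_equal_est_symetrique := by
  intro grille mode_ligne _ hpre
  unfold Spec_est_symetrique
  exact est_symetrique_main grille mode_ligne hpre
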